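-- pv_equiv track=rewrite | github.com/pannet1/halo-hash | halo_hash/main.py | is_available_in_position_book
-- ===== SOURCE A (Python) =====
-- def is_available_in_position_book(open_positions, config):
--     # set this to True sym_config["is_in_position_book"]
--     quantity = 0
--     desired_position = {}
--     is_exit_50_reached = False
--     for position in open_positions:
--         if config["symbol"] == position["symbol"]:  # Add strategy name here
--             dir = 1 if position["side"] == "B" else -1
--             quantity += int(position["quantity"]) * dir
--     for value in open_positions[::-1]:
--         if config["symbol"] == value["symbol"]:  # Add strategy name here
--             desired_position = value
--             break
--     for value in open_positions:
--         if config["symbol"] == value["symbol"]:  # Add strategy name here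
--             if value.get("is_exit_50_reached", False):
--                 is_exit_50_reached = True
--     return (quantity, desired_position, is_exit_50_reached)
-- ===== SOURCE B (Python) =====
-- def is_available_in_position_book(open_positions, config):
--     quantity = 0
--     desired_position = {}
--     is_exit_50_reached = False
--     for position in open_positions:
--         if position["symbol"] != config["symbol"]:
--             continue
--         quantity += int(position["quantity"]) * (1 if position["side"] == "B" else -1)
--         desired_position = position
--         is_exit_50_reached = is_exit_50_reached or bool(position.get("is_exit_50_reached", False))
--     return (quantity, desired_position, is_exit_50_reached)
-- ===== Notes on version B (the rewrite author's own statement) =====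
-- stated objective: simpler
-- what changed: Replaces A's three scans (sum pass, reverse scan with break, flag pass) by one forward loop that accumulates the signed quantity, overwrites desired_position so the last match wins, and ORs the exit flag.
import Mathlib
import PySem

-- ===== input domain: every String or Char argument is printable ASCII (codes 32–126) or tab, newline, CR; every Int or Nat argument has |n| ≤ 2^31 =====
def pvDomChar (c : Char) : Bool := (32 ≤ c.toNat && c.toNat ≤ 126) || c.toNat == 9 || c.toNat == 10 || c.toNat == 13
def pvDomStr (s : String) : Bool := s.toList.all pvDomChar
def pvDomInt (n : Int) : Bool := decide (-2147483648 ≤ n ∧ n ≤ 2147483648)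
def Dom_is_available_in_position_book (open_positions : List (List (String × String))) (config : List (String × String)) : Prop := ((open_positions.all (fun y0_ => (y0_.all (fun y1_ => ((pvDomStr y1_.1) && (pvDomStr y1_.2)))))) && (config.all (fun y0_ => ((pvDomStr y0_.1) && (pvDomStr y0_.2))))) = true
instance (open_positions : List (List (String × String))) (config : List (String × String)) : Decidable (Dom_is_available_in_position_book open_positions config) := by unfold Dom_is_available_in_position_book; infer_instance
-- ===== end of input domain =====

-- B replaces A's three scans over open_positions by a single forward loop (simpler decomposition); same return value on Pre_.


-- shared dict primitive: d[k] / d.get(k) as first-match lookup on the association list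
def pvGet (d : List (String × String)) (k : String) : Option String :=
  (PySem.Dict.mk d).get? k

-- Python truthiness of value.get("is_exit_50_reached", False): a present value (a string) is truthy iff nonempty
def pvTruthy : Option String → Bool
  | some s => s != ""
  | none => false

-- ===== PORT A =====
-- A's second loop: 'for value in open_positions[::-1]: if match: desired_position = value; break'
def pvFindBreak (config : List (String × String)) : List (List (String × String)) → List (String × String)
  | [] => []
  | v :: rest =>
    if (pvGet config "symbol").getD "" == (pvGet v "symbol").getD "" then v
    else pvFindBreak config rest

def is_available_in_position_book (open_positions : List (List (String × String))) (config : List (String × String)) : Int × (List (String × String)) × Bool :=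
  -- loop 1: signed quantity
  let quantity : Int := open_positions.foldl (fun q position =>
    if (pvGet config "symbol").getD "" == (pvGet position "symbol").getD "" then
      q + ((PySem.Int.ofStr? ((pvGet position "quantity").getD "")).getD 0) *
          (if (pvGet position "side").getD "" == "B" then (1 : Int) else -1)
    else q) 0
  -- loop 2: first match of the reversed list (xs[::-1]), with break
  let desired_position := pvFindBreak config open_positions.reverse
  -- loop 3: exit flag
  let is_exit_50_reached := open_positions.foldl (fun fl value =>
    if (pvGet config "symbol").getD "" == (pvGet value "symbol").getD "" then
      (if pvTruthy (pvGet value "is_exit_50_reached") then true else fl)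
    else fl) false
  (quantity, desired_position, is_exit_50_reached)

-- ===== PORT B =====
def is_available_in_position_book_alt (open_positions : List (List (String × String))) (config : List (String × String)) : Int × (List (String × String)) × Bool :=
  open_positions.foldl (fun st position =>
    if (pvGet position "symbol").getD "" != (pvGet config "symbol").getD "" then st
    else (st.1 + ((PySem.Int.ofStr? ((pvGet position "quantity").getD "")).getD 0) *
            (if (pvGet position "side").getD "" == "B" then (1 : Int) else -1),
          position,
          st.2.2 || pvTruthy (pvGet position "is_exit_50_reached")))
    ((0 : Int), ([] : List (String × String)), false)

-- ===== PRECONDITION & SPEC =====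
-- Pre_ excludes exactly the inputs on which the Python raises (A and B raise on the same inputs):
-- some position lacks the "symbol" key, or config lacks "symbol" while open_positions is nonempty, or a
-- matching position lacks "side" or has a missing/non-int-parsable "quantity" (KeyError/ValueError).
def Pre_is_available_in_position_book (open_positions : List (List (String × String))) (config : List (String × String)) : Prop :=
  ∀ pos ∈ open_positions, (pvGet config "symbol").isSome ∧ (pvGet pos "symbol").isSome ∧
    ((pvGet config "symbol").getD "" = (pvGet pos "symbol").getD "" →
      (pvGet pos "side").isSome ∧ (PySem.Int.ofStr? ((pvGet pos "quantity").getD "")).isSome)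
instance (open_positions : List (List (String × String))) (config : List (String × String)) : Decidable (Pre_is_available_in_position_book open_positions config) := by unfold Pre_is_available_in_position_book; infer_instance

def pvWitness_is_available_in_position_book : (List (List (String × String))) × (List (String × String)) :=
  ([[("symbol", "X"), ("side", "B"), ("quantity", "5")]], [("symbol", "X")])

def Spec_is_available_in_position_book (open_positions : List (List (String × String))) (config : List (String × String)) (out : Int × (List (String × String)) × Bool) : Prop := out = is_available_in_position_book_alt open_positions config
instance (open_positions : List (List (String × String))) (config : List (String × String)) (out : Int × (List (String × String)) × Bool) : Decidable (Spec_is_available_in_position_book open_positions config out) := by unfold Spec_is_available_in_position_book; infer_instance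

-- ===== CLAIM (what is proved, stated in full; the proofs are below) =====
def Claim_equal_is_available_in_position_book : Prop := ∀ (open_positions : List (List (String × String))) (config : List (String × String)), Dom_is_available_in_position_book open_positions config → Pre_is_available_in_position_book open_positions config → Spec_is_available_in_position_book open_positions config (is_available_in_position_book open_positions config)

-- ===== LEMMAS AND PROOFS =====

-- per-position match condition and contribution (proof-side characterisation)
def pvM (config pos : List (String × String)) : Bool :=
  (pvGet config "symbol").getD "" == (pvGet pos "symbol").getD ""

def pvQty (pos : List (String × String)) : Int :=
  ((PySem.Int.ofStr? ((pvGet pos "quantity").getD "")).getD 0) *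
    (if (pvGet pos "side").getD "" == "B" then (1 : Int) else -1)

def pvS (config : List (String × String)) : List (List (String × String)) → Int
  | [] => 0
  | x :: xs => (if pvM config x then pvQty x else 0) + pvS config xs

def pvF (config : List (String × String)) : List (List (String × String)) → Bool
  | [] => false
  | x :: xs => (if pvM config x then pvTruthy (pvGet x "is_exit_50_reached") else false) || pvF config xs

def pvLast (config : List (String × String)) (d : List (String × String)) : List (List (String × String)) → List (String × String)
  | [] => d
  | x :: xs => pvLast config (if pvM config x then x else d) xs

theorem pvA_loop1 (config : List (String × String)) (xs : List (List (String × String))) : ∀ q : Int,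
    xs.foldl (fun q position =>
      if (pvGet config "symbol").getD "" == (pvGet position "symbol").getD "" then
        q + ((PySem.Int.ofStr? ((pvGet position "quantity").getD "")).getD 0) *
            (if (pvGet position "side").getD "" == "B" then (1 : Int) else -1)
      else q) q = q + pvS config xs := by
  induction xs with
  | nil => intro q; simp [pvS]
  | cons x xs ih =>
    intro q
    rw [List.foldl_cons]
    by_cases h : (pvGet config "symbol").getD "" = (pvGet x "symbol").getD ""
    · rw [if_pos (by simp [h]), ih]
      simp [pvS, pvM, pvQty, h, add_assoc]
    · rw [if_neg (by simp [h]), ih]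
      simp [pvS, pvM, h]

theorem pvA_loop3 (config : List (String × String)) (xs : List (List (String × String))) : ∀ fl : Bool,
    xs.foldl (fun fl value =>
      if (pvGet config "symbol").getD "" == (pvGet value "symbol").getD "" then
        (if pvTruthy (pvGet value "is_exit_50_reached") then true else fl)
      else fl) fl = (fl || pvF config xs) := by
  induction xs with
  | nil => intro fl; simp [pvF]
  | cons x xs ih =>
    intro fl
    rw [List.foldl_cons]
    by_cases h : (pvGet config "symbol").getD "" = (pvGet x "symbol").getD ""
    · rw [if_pos (by simp [h]), ih]
      cases ht : pvTruthy (pvGet x "is_exit_50_reached") <;>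
        simp [pvF, pvM, h, ht]
    · rw [if_neg (by simp [h]), ih]
      simp [pvF, pvM, h]

theorem pvA_loop2 (config : List (String × String)) (xs : List (List (String × String))) :
    ∀ l : List (List (String × String)),
      pvFindBreak config (xs.reverse ++ l) = pvLast config (pvFindBreak config l) xs := by
  induction xs with
  | nil => intro l; simp [pvLast]
  | cons x xs ih =>
    intro l
    rw [List.reverse_cons, List.append_assoc, List.singleton_append, ih]
    by_cases h : (pvGet config "symbol").getD "" = (pvGet x "symbol").getD "" <;>
      simp [pvLast, pvFindBreak, pvM, h]

theorem pvB_fold (config : List (String × String)) (xs : List (List (String × String))) :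
    ∀ (q : Int) (dp : List (String × String)) (fl : Bool),
      xs.foldl (fun st position =>
        if (pvGet position "symbol").getD "" != (pvGet config "symbol").getD "" then st
        else (st.1 + ((PySem.Int.ofStr? ((pvGet position "quantity").getD "")).getD 0) *
                (if (pvGet position "side").getD "" == "B" then (1 : Int) else -1),
              position,
              st.2.2 || pvTruthy (pvGet position "is_exit_50_reached"))) (q, dp, fl)
      = (q + pvS config xs, pvLast config dp xs, fl || pvF config xs) := by
  induction xs with
  | nil => intro q dp fl; simp [pvS, pvLast, pvF]
  | cons x xs ih =>
    intro q dp fl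
    rw [List.foldl_cons]
    by_cases h : (pvGet config "symbol").getD "" = (pvGet x "symbol").getD ""
    · rw [if_neg (by simp [bne_iff_ne]; exact h.symm)]
      rw [ih]
      simp [pvS, pvLast, pvF, pvM, pvQty, h, add_assoc, Bool.or_assoc]
    · rw [if_pos (by simp [bne_iff_ne]; exact fun e => h e.symm)]
      rw [ih]
      simp [pvS, pvLast, pvF, pvM, h]

-- ===== VERDICT (by name: the statement is the Claim_ definition above) =====
theorem is_available_in_position_book_spec : Claim_equal_is_available_in_position_book := by
  unfold Claim_equal_is_available_in_position_book
  intro ops config _dom _pre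
  unfold Spec_is_available_in_position_book
  unfold is_available_in_position_book is_available_in_position_book_alt
  have h2 : pvFindBreak config (ops.reverse) = pvLast config [] ops := by
    have := pvA_loop2 config ops []
    simpa [pvFindBreak] using this
  simp only [pvA_loop1, pvA_loop3, pvB_fold, h2, Int.zero_add, Bool.false_or]
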